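-- pv_equiv track=rewrite | github.com/Nghia03092004/nghia03092004.github.io | project_euler_unified/problem_638/solution.py | compute_C
-- ===== SOURCE A (Python) =====
-- MOD = 10**9 + 7
--
-- def power(base, exp, mod):
--     result = 1
--     base %= mod
--     while exp > 0:
--         if exp & 1:
--             result = result * base % mod
--         base = base * base % mod
--         exp >>= 1
--     return result
--
-- def modinv(a, mod):
--     return power(a, mod - 2, mod)
--
-- def compute_C(n, k):
--     """Compute C(n, n, k) = [2n choose n]_k mod MOD."""
--     if k == 1:
--         # binom(2n, n) mod MOD
--         result = 1
--         for i in range(1, n + 1):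
--             result = result * ((n + i) % MOD) % MOD
--             result = result * modinv(i % MOD, MOD) % MOD
--         return result
--
--     # For k >= 2: prod_{i=1}^{n} (k^{n+i} - 1) / (k^i - 1)
--     result = 1
--     for i in range(1, n + 1):
--         exp_num = (n + i) % (MOD - 1)
--         exp_den = i % (MOD - 1)
--
--         num = (power(k, exp_num, MOD) - 1) % MOD
--         den = (power(k, exp_den, MOD) - 1) % MOD
--
--         result = result * num % MOD
--         result = result * modinv(den, MOD) % MOD
--
--     return result
-- ===== SOURCE B (Python) =====
-- MOD = 10**9 + 7
--
-- def power(base, exp, mod):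
--     result = 1
--     base %= mod
--     while exp > 0:
--         if exp & 1:
--             result = result * base % mod
--         base = base * base % mod
--         exp >>= 1
--     return result
--
-- def compute_C(n, k):
--     """Compute C(n, n, k) = [2n choose n]_k mod MOD.
--
--     Incremental powers of k (exact wrap when the reduced exponent reaches
--     MOD-1) and a single batched modular inverse of the denominator product.
--     """
--     if k == 1:
--         num = 1
--         den = 1
--         for i in range(1, n + 1):
--             num = num * ((n + i) % MOD) % MOD
--             den = den * (i % MOD) % MOD
--         return num * power(den, MOD - 2, MOD) % MOD
--
--     num = 1
--     den = 1
--     e_num = (n + 1) % (MOD - 1)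
--     pw_num = power(k, e_num, MOD)
--     e_den = 1 % (MOD - 1)
--     pw_den = power(k, e_den, MOD)
--     for i in range(1, n + 1):
--         num = num * ((pw_num - 1) % MOD) % MOD
--         den = den * ((pw_den - 1) % MOD) % MOD
--         e_num += 1
--         if e_num == MOD - 1:
--             e_num = 0
--             pw_num = 1
--         else:
--             pw_num = pw_num * k % MOD
--         e_den += 1
--         if e_den == MOD - 1:
--             e_den = 0
--             pw_den = 1
--         else:
--             pw_den = pw_den * k % MOD
--     return num * power(den, MOD - 2, MOD) % MOD
-- ===== Notes on version B (the rewrite author's own statement) =====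
-- stated objective: faster
-- what changed: replaces the per-term modular exponentiations and per-term modular inverses by incrementally maintained powers of k (with an exact wrap when the reduced exponent reaches MOD-1) and one single batched modular inverse of the accumulated denominator product
import Mathlib
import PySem

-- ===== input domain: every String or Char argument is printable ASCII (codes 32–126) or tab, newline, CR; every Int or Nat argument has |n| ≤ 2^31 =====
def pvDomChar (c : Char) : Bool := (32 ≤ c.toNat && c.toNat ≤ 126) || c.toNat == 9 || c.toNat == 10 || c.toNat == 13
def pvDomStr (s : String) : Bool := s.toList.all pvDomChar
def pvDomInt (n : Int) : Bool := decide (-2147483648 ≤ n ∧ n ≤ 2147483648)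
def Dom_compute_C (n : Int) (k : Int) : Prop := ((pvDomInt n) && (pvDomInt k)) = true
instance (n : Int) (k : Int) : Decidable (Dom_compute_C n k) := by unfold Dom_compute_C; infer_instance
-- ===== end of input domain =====

-- B replaces per-term modular exponentiations/inverses by incrementally maintained
-- powers of k and a single batched modular inverse of the denominator product (faster).
-- All Python '%'/'//'/'>>1' here have a positive right operand, so Lean's Euclidean
-- Int.emod/Int.ediv coincide with Python's floor semantics; ported with % and / directly.

-- ===== PORT A =====
def pvMOD : Int := 1000000007

def powerGo (result base exp m : Int) : Int :=
  if 0 < exp then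
    powerGo (if exp % 2 = 1 then result * base % m else result) (base * base % m) (exp / 2) m
  else result
termination_by exp.toNat
decreasing_by omega

def power (base exp m : Int) : Int := powerGo 1 (base % m) exp m

def modinv (a m : Int) : Int := power a (m - 2) m

def compute_C (n : Int) (k : Int) : Int :=
  if k = 1 then
    (PySem.List.pyRange 1 (n + 1) 1).foldl
      (fun result i =>
        let r1 := result * ((n + i) % pvMOD) % pvMOD
        r1 * modinv (i % pvMOD) pvMOD % pvMOD) 1
  else
    (PySem.List.pyRange 1 (n + 1) 1).foldl
      (fun result i =>
        let exp_num := (n + i) % (pvMOD - 1)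
        let exp_den := i % (pvMOD - 1)
        let num := (power k exp_num pvMOD - 1) % pvMOD
        let den := (power k exp_den pvMOD - 1) % pvMOD
        result * num % pvMOD * modinv den pvMOD % pvMOD) 1

-- ===== PORT B =====
def compute_C_alt (n : Int) (k : Int) : Int :=
  if k = 1 then
    let s :=
      (PySem.List.pyRange 1 (n + 1) 1).foldl
        (fun (s : Int × Int) i =>
          (s.1 * ((n + i) % pvMOD) % pvMOD, s.2 * (i % pvMOD) % pvMOD)) (1, 1)
    s.1 * power s.2 (pvMOD - 2) pvMOD % pvMOD
  else
    let e0 := (n + 1) % (pvMOD - 1)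
    let s :=
      (PySem.List.pyRange 1 (n + 1) 1).foldl
        (fun (s : Int × Int × Int × Int × Int × Int) _ =>
          let num' := s.1 * ((s.2.2.2.1 - 1) % pvMOD) % pvMOD
          let den' := s.2.1 * ((s.2.2.2.2.2 - 1) % pvMOD) % pvMOD
          let en' := if s.2.2.1 + 1 = pvMOD - 1 then (0 : Int) else s.2.2.1 + 1
          let pn' := if s.2.2.1 + 1 = pvMOD - 1 then (1 : Int) else s.2.2.2.1 * k % pvMOD
          let ed' := if s.2.2.2.2.1 + 1 = pvMOD - 1 then (0 : Int) else s.2.2.2.2.1 + 1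
          let pd' := if s.2.2.2.2.1 + 1 = pvMOD - 1 then (1 : Int) else s.2.2.2.2.2 * k % pvMOD
          (num', den', en', pn', ed', pd'))
        (1, 1, e0, power k e0 pvMOD, 1 % (pvMOD - 1), power k (1 % (pvMOD - 1)) pvMOD)
    s.1 * power s.2.1 (pvMOD - 2) pvMOD % pvMOD

-- ===== PRECONDITION & SPEC =====
def Spec_compute_C (n : Int) (k : Int) (out : Int) : Prop := out = compute_C_alt n k
instance (n : Int) (k : Int) (out : Int) : Decidable (Spec_compute_C n k out) := by unfold Spec_compute_C; infer_instance

-- ===== CLAIM (what is proved, stated in full; the proofs are below) =====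
def Claim_equal_compute_C : Prop := ∀ (n : Int) (k : Int), Dom_compute_C n k → Spec_compute_C n k (compute_C n k)

-- ===== LEMMAS AND PROOFS =====

def pvStepA (f g : Int → Int) (r i : Int) : Int :=
  r * f i % pvMOD * power (g i) (pvMOD - 2) pvMOD % pvMOD

def pvStepP (f g : Int → Int) (s : Int × Int) (i : Int) : Int × Int :=
  (s.1 * f i % pvMOD, s.2 * g i % pvMOD)

theorem pv_castM (a : Int) : ((a % pvMOD : Int) : ZMod 1000000007) = (a : ZMod 1000000007) := by
  have h : pvMOD = ((1000000007 : ℕ) : ℤ) := by norm_num [pvMOD]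
  rw [h]
  exact ZMod.intCast_mod a 1000000007

theorem pv_int_eq_of_cast {a b : Int} (ha : 0 ≤ a) (ha2 : a < pvMOD) (hb : 0 ≤ b)
    (hb2 : b < pvMOD) (h : (a : ZMod 1000000007) = (b : ZMod 1000000007)) : a = b := by
  have h2 := (ZMod.intCast_eq_intCast_iff' a b 1000000007).mp h
  have hM : pvMOD = (1000000007 : Int) := rfl
  rw [hM] at ha2 hb2
  have : ((1000000007 : ℕ) : ℤ) = (1000000007 : ℤ) := by norm_num
  rw [this] at h2
  omega

theorem powerGo_cast (e r b : Int) :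
    ((powerGo r b e pvMOD : Int) : ZMod 1000000007) =
      (r : ZMod 1000000007) * (b : ZMod 1000000007) ^ e.toNat := by
  fun_induction powerGo r b e pvMOD with
  | case1 r b e hpos ih =>
    by_cases hodd : e % 2 = 1
    · rw [dif_pos hodd] at ih
      rw [if_pos hodd]
      rw [ih, pv_castM, pv_castM]
      push_cast
      have he : e.toNat = 2 * (e / 2).toNat + 1 := by omega
      rw [he]
      ring
    · rw [dif_neg hodd] at ih
      rw [if_neg hodd]
      rw [ih, pv_castM]
      have he : e.toNat = 2 * (e / 2).toNat := by omega
      rw [he]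
      push_cast
      ring
  | case2 r b e hpos =>
    have he : e.toNat = 0 := by omega
    rw [he]
    simp

theorem powerGo_range (e r b : Int) (hr : 0 ≤ r) (hr2 : r < pvMOD) :
    0 ≤ powerGo r b e pvMOD ∧ powerGo r b e pvMOD < pvMOD := by
  fun_induction powerGo r b e pvMOD with
  | case1 r b e hpos ih =>
    apply ih <;> (split_ifs with hodd; · have := Int.emod_nonneg (r * b) (by norm_num [pvMOD] : pvMOD ≠ 0); have := Int.emod_lt_of_pos (r * b) (by norm_num [pvMOD] : (0:Int) < pvMOD); omega
                  · omega)
  | case2 r b e hpos => exact ⟨hr, hr2⟩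

theorem power_cast (b e : Int) :
    ((power b e pvMOD : Int) : ZMod 1000000007) = (b : ZMod 1000000007) ^ e.toNat := by
  unfold power
  rw [powerGo_cast, pv_castM]
  simp

theorem power_range (b e : Int) : 0 ≤ power b e pvMOD ∧ power b e pvMOD < pvMOD :=
  powerGo_range e 1 (b % pvMOD) (by norm_num) (by norm_num [pvMOD])

theorem power_zero (b : Int) : power b 0 pvMOD = 1 := by
  unfold power powerGo
  simp

theorem pw_step (kk e : Int) (he : 0 ≤ e) :
    power kk (e + 1) pvMOD = power kk e pvMOD * kk % pvMOD := by
  have h1 := power_range kk (e + 1)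
  have h2 := Int.emod_nonneg (power kk e pvMOD * kk) (by norm_num [pvMOD] : pvMOD ≠ 0)
  have h3 := Int.emod_lt_of_pos (power kk e pvMOD * kk) (by norm_num [pvMOD] : (0:Int) < pvMOD)
  apply pv_int_eq_of_cast h1.1 h1.2 h2 h3
  rw [power_cast, pv_castM]
  push_cast
  rw [power_cast]
  have : (e + 1).toNat = e.toNat + 1 := by omega
  rw [this, pow_succ]

theorem afold_cast (f g : Int → Int) (L : List Int) (r : Int) :
    ((L.foldl (pvStepA f g) r : Int) : ZMod 1000000007) =
      (r : ZMod 1000000007) *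
        (L.map (fun i => ((f i : Int) : ZMod 1000000007) *
          ((g i : Int) : ZMod 1000000007) ^ 1000000005)).prod := by
  induction L generalizing r with
  | nil => simp
  | cons x t ih =>
    rw [List.foldl_cons, ih, List.map_cons, List.prod_cons]
    unfold pvStepA
    rw [pv_castM]
    push_cast
    rw [pv_castM]
    push_cast
    rw [power_cast]
    rw [show (pvMOD - 2).toNat = 1000000005 from rfl]
    ring

theorem afold_range (f g : Int → Int) (L : List Int) (r : Int) (hr : 0 ≤ r) (hr2 : r < pvMOD) :
    0 ≤ L.foldl (pvStepA f g) r ∧ L.foldl (pvStepA f g) r < pvMOD := by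
  induction L generalizing r with
  | nil => exact ⟨hr, hr2⟩
  | cons x t ih =>
    rw [List.foldl_cons]
    apply ih
    · exact Int.emod_nonneg _ (by norm_num [pvMOD])
    · exact Int.emod_lt_of_pos _ (by norm_num [pvMOD])

theorem pfold_cast (f g : Int → Int) (L : List Int) (N D : Int) :
    (((L.foldl (pvStepP f g) (N, D)).1 : Int) : ZMod 1000000007) =
        (N : ZMod 1000000007) * (L.map (fun i => ((f i : Int) : ZMod 1000000007))).prod ∧
    (((L.foldl (pvStepP f g) (N, D)).2 : Int) : ZMod 1000000007) =
        (D : ZMod 1000000007) * (L.map (fun i => ((g i : Int) : ZMod 1000000007))).prod := by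
  induction L generalizing N D with
  | nil => simp
  | cons x t ih =>
    rw [List.foldl_cons]
    obtain ⟨ih1, ih2⟩ := ih (N * f x % pvMOD) (D * g x % pvMOD)
    constructor
    · rw [show pvStepP f g (N, D) x = (N * f x % pvMOD, D * g x % pvMOD) from rfl]
      rw [ih1, pv_castM, List.map_cons, List.prod_cons]
      push_cast
      ring
    · rw [show pvStepP f g (N, D) x = (N * f x % pvMOD, D * g x % pvMOD) from rfl]
      rw [ih2, pv_castM, List.map_cons, List.prod_cons]
      push_cast
      ring

theorem prod_mul_pow (f g : Int → Int) (L : List Int) :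
    (L.map (fun i => ((f i : Int) : ZMod 1000000007) *
        ((g i : Int) : ZMod 1000000007) ^ 1000000005)).prod =
      (L.map (fun i => ((f i : Int) : ZMod 1000000007))).prod *
        ((L.map (fun i => ((g i : Int) : ZMod 1000000007))).prod) ^ 1000000005 := by
  induction L with
  | nil =>
    simp only [List.map_nil, List.prod_nil]
    rw [one_pow, mul_one]
  | cons x t ih =>
    rw [List.map_cons, List.map_cons, List.map_cons, List.prod_cons, List.prod_cons,
      List.prod_cons, ih, mul_pow]
    ring

theorem fold_eq (f g : Int → Int) (L : List Int) :
    L.foldl (pvStepA f g) 1 =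
      (L.foldl (pvStepP f g) (1, 1)).1 *
        power (L.foldl (pvStepP f g) (1, 1)).2 (pvMOD - 2) pvMOD % pvMOD := by
  have hA := afold_range f g L 1 (by norm_num) (by norm_num [pvMOD])
  have hB1 := Int.emod_nonneg ((L.foldl (pvStepP f g) (1, 1)).1 *
    power (L.foldl (pvStepP f g) (1, 1)).2 (pvMOD - 2) pvMOD) (by norm_num [pvMOD] : pvMOD ≠ 0)
  have hB2 := Int.emod_lt_of_pos ((L.foldl (pvStepP f g) (1, 1)).1 *
    power (L.foldl (pvStepP f g) (1, 1)).2 (pvMOD - 2) pvMOD) (by norm_num [pvMOD] : (0:Int) < pvMOD)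
  apply pv_int_eq_of_cast hA.1 hA.2 hB1 hB2
  rw [afold_cast, pv_castM]
  push_cast
  rw [power_cast]
  obtain ⟨h1, h2⟩ := pfold_cast f g L 1 1
  rw [h1, h2]
  rw [show (pvMOD - 2).toNat = 1000000005 from rfl, prod_mul_pow]
  push_cast
  ring

-- B's big state fold (k ≥ 2 branch) computes the same (num, den) pair as the plain pair fold
def pvStepB (kk : Int) (s : Int × Int × Int × Int × Int × Int) (_ : Int) :
    Int × Int × Int × Int × Int × Int :=
  let num' := s.1 * ((s.2.2.2.1 - 1) % pvMOD) % pvMOD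
  let den' := s.2.1 * ((s.2.2.2.2.2 - 1) % pvMOD) % pvMOD
  let en' := if s.2.2.1 + 1 = pvMOD - 1 then (0 : Int) else s.2.2.1 + 1
  let pn' := if s.2.2.1 + 1 = pvMOD - 1 then (1 : Int) else s.2.2.2.1 * kk % pvMOD
  let ed' := if s.2.2.2.2.1 + 1 = pvMOD - 1 then (0 : Int) else s.2.2.2.2.1 + 1
  let pd' := if s.2.2.2.2.1 + 1 = pvMOD - 1 then (1 : Int) else s.2.2.2.2.2 * kk % pvMOD
  (num', den', en', pn', ed', pd')

def pvFN (nn kk : Int) (i : Int) : Int := (power kk ((nn + i) % (pvMOD - 1)) pvMOD - 1) % pvMOD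
def pvGD (kk : Int) (i : Int) : Int := (power kk (i % (pvMOD - 1)) pvMOD - 1) % pvMOD

theorem step_mod (c x : Int) (hc : 1 < c) :
    (if x % c + 1 = c then (0 : Int) else x % c + 1) = (x + 1) % c := by
  have h1 := Int.emod_nonneg x (by omega : c ≠ 0)
  have h2 := Int.emod_lt_of_pos x (by omega : (0:Int) < c)
  have h1c : (1 : Int) % c = 1 := Int.emod_eq_of_lt (by omega) hc
  have key : (x + 1) % c = (x % c + 1) % c := by rw [Int.add_emod, h1c]
  split_ifs with h
  · rw [key, h, Int.emod_self]
  · rw [key, Int.emod_eq_of_lt (show (0:Int) ≤ x % c + 1 by omega) (show x % c + 1 < c by omega)]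

theorem pw_if (kk c x : Int) (hc : c = pvMOD - 1) (hx : 0 ≤ x % c) :
    (if x % c + 1 = c then (1 : Int) else power kk (x % c) pvMOD * kk % pvMOD) =
      power kk ((x + 1) % c) pvMOD := by
  have hc1 : (1:Int) < c := by rw [hc]; norm_num [pvMOD]
  rw [← step_mod c x hc1]
  split_ifs with h
  · rw [power_zero]
  · rw [pw_step kk (x % c) hx]

theorem bstate_step (nn kk a num den : Int) :
    pvStepB kk (num, den, (nn + a) % (pvMOD - 1), power kk ((nn + a) % (pvMOD - 1)) pvMOD,
        a % (pvMOD - 1), power kk (a % (pvMOD - 1)) pvMOD) a =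
      (num * pvFN nn kk a % pvMOD, den * pvGD kk a % pvMOD,
       (nn + (a + 1)) % (pvMOD - 1), power kk ((nn + (a + 1)) % (pvMOD - 1)) pvMOD,
       (a + 1) % (pvMOD - 1), power kk ((a + 1) % (pvMOD - 1)) pvMOD) := by
  have hcM : (pvMOD - 1 : Int) = pvMOD - 1 := rfl
  have hnn : nn + (a + 1) = (nn + a) + 1 := by ring
  have hxn := Int.emod_nonneg (nn + a) (by norm_num [pvMOD] : (pvMOD - 1 : Int) ≠ 0)
  have hxd := Int.emod_nonneg a (by norm_num [pvMOD] : (pvMOD - 1 : Int) ≠ 0)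
  have hc1 : (1:Int) < pvMOD - 1 := by norm_num [pvMOD]
  simp only [pvStepB, pvFN, pvGD, Prod.mk.injEq]
  refine ⟨trivial, trivial, ?_, ?_, ?_, ?_⟩
  · rw [hnn, ← step_mod (pvMOD - 1) (nn + a) hc1]
  · rw [hnn, ← pw_if kk (pvMOD - 1) (nn + a) rfl hxn]
  · rw [← step_mod (pvMOD - 1) a hc1]
  · rw [← pw_if kk (pvMOD - 1) a rfl hxd]

theorem bstate_eq (nn kk : Int) (m : Nat) : ∀ (a num den : Int), (nn + 1 - a).toNat = m →
    ((PySem.List.pyRange a (nn + 1) 1).foldl (pvStepB kk)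
        (num, den, (nn + a) % (pvMOD - 1), power kk ((nn + a) % (pvMOD - 1)) pvMOD,
         a % (pvMOD - 1), power kk (a % (pvMOD - 1)) pvMOD)).1 =
      ((PySem.List.pyRange a (nn + 1) 1).foldl (pvStepP (pvFN nn kk) (pvGD kk)) (num, den)).1 ∧
    ((PySem.List.pyRange a (nn + 1) 1).foldl (pvStepB kk)
        (num, den, (nn + a) % (pvMOD - 1), power kk ((nn + a) % (pvMOD - 1)) pvMOD,
         a % (pvMOD - 1), power kk (a % (pvMOD - 1)) pvMOD)).2.1 =
      ((PySem.List.pyRange a (nn + 1) 1).foldl (pvStepP (pvFN nn kk) (pvGD kk)) (num, den)).2 := by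
  induction m with
  | zero =>
    intro a num den hm
    rw [PySem.List.pyRange_one_eq_nil (by omega : nn + 1 ≤ a)]
    simp only [List.foldl_nil]
    exact ⟨trivial, trivial⟩
  | succ m ih =>
    intro a num den hm
    rw [PySem.List.pyRange_one_cons (by omega : a < nn + 1)]
    rw [List.foldl_cons, List.foldl_cons, bstate_step nn kk a num den]
    exact ih (a + 1) (num * pvFN nn kk a % pvMOD) (den * pvGD kk a % pvMOD) (by omega)

theorem compute_C_eq_alt (n k : Int) : compute_C n k = compute_C_alt n k := by
  unfold compute_C compute_C_alt
  split_ifs with hk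
  · exact fold_eq (fun i => (n + i) % pvMOD) (fun i => i % pvMOD) _
  · have hb := bstate_eq n k ((n + 1 - 1).toNat) 1 1 1 rfl
    show (PySem.List.pyRange 1 (n + 1) 1).foldl (pvStepA (pvFN n k) (pvGD k)) 1 =
      ((PySem.List.pyRange 1 (n + 1) 1).foldl (pvStepB k)
          (1, 1, (n + 1) % (pvMOD - 1), power k ((n + 1) % (pvMOD - 1)) pvMOD,
           1 % (pvMOD - 1), power k (1 % (pvMOD - 1)) pvMOD)).1 *
        power ((PySem.List.pyRange 1 (n + 1) 1).foldl (pvStepB k)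
          (1, 1, (n + 1) % (pvMOD - 1), power k ((n + 1) % (pvMOD - 1)) pvMOD,
           1 % (pvMOD - 1), power k (1 % (pvMOD - 1)) pvMOD)).2.1 (pvMOD - 2) pvMOD % pvMOD
    rw [hb.1, hb.2]
    exact fold_eq (pvFN n k) (pvGD k) _

-- ===== VERDICT (by name: the statement is the Claim_ definition above) =====
theorem compute_C_spec : Claim_equal_compute_C := by
  intro n k _
  unfold Spec_compute_C
  exact compute_C_eq_alt n k
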